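-- pv_equiv track=rewrite | github.com/mramirezraul71/atlas-core | modules/quality/policy.py | is_path_excluded
-- ===== SOURCE A (Python) =====
-- from typing import Iterable, List, Tuple
--
-- def is_path_excluded(path: str, exclude_paths: Iterable[str]) -> bool:
--     p = (path or "").replace("\\", "/").lstrip("./")
--     for ex in exclude_paths:
--         exn = (ex or "").replace("\\", "/").strip().strip("/")
--         if not exn:
--             continue
--         if p == exn or p.startswith(exn + "/"):
--             return True
--     return False
-- ===== SOURCE B (Python) =====
-- def is_path_excluded(path, exclude_paths):
--     norm = set()
--     for ex in exclude_paths: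
--         exn = (ex or "").replace("\\", "/").strip().strip("/")
--         if exn:
--             norm.add(exn)
--     p = (path or "").replace("\\", "/").lstrip("./")
--     acc = ""
--     for ch in p:
--         if ch == "/" and acc in norm:
--             return True
--         acc += ch
--     return acc in norm
-- ===== Notes on version B (the rewrite author's own statement) =====
-- stated objective: alternative
-- what changed: B builds a set of the normalized non-empty excludes in one pass, then scans the normalized path once left-to-right, testing set membership of the accumulated prefix at each '/' boundary and of the full path at the end, instead of A's per-exclude equality/startswith scan.
import Mathlib
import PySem

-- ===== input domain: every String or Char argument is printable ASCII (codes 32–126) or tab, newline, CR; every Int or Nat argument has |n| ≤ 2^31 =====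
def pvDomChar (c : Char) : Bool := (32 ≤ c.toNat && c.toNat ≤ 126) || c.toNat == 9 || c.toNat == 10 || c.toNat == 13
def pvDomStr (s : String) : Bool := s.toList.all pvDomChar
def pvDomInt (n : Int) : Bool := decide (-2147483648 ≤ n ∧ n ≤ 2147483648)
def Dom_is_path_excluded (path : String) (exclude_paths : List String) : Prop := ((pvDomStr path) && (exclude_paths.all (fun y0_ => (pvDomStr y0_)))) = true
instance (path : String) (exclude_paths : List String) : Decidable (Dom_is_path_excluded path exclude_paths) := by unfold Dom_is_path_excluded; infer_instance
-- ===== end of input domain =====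

-- B replaces A's per-exclude startswith scan by a set of normalized excludes built once
-- plus a single left-to-right scan of the path testing membership at each '/' boundary ("alternative").

-- ===== PORT A =====
-- p = path.replace("\\", "/").lstrip("./")
-- lstrip("./") drops leading characters belonging to {'.', '/'}: exact as dropWhile on that char set
def aNormP (path : String) : List Char :=
  (PySem.Chars.replace path.toList ['\\'] ['/']).dropWhile (fun c => c == '.' || c == '/')
-- exn = ex.replace("\\", "/").strip().strip("/")
def aNormEx (ex : String) : List Char :=
  PySem.Chars.stripChars (PySem.Chars.strip (PySem.Chars.replace ex.toList ['\\'] ['/'])) ['/']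
-- the 'for ex in exclude_paths' loop with its early return
def aLoop (p : List Char) : List String → Bool
  | [] => false
  | ex :: rest =>
    let exn := aNormEx ex
    if exn = [] then aLoop p rest
    else if p = exn ∨ PySem.Chars.startswith p (exn ++ ['/']) = true then true
    else aLoop p rest

def is_path_excluded (path : String) (exclude_paths : List String) : Bool :=
  aLoop (aNormP path) exclude_paths

-- ===== PORT B =====
def bNormEx (ex : String) : List Char :=
  PySem.Chars.stripChars (PySem.Chars.strip (PySem.Chars.replace ex.toList ['\\'] ['/'])) ['/']
def bNormP (path : String) : List Char :=
  (PySem.Chars.replace path.toList ['\\'] ['/']).dropWhile (fun c => c == '.' || c == '/')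
-- norm = set(); for ex in exclude_paths: exn = …; if exn: norm.add(exn)
def bSet (exclude_paths : List String) : PySem.Set (List Char) :=
  exclude_paths.foldl (fun s ex =>
    let exn := bNormEx ex
    if exn = [] then s else s.add exn) []
-- acc = ""; for ch in p: if ch == "/" and acc in norm: return True; acc += ch
-- return acc in norm
def bScan (norm : PySem.Set (List Char)) : List Char → List Char → Bool
  | acc, [] => norm.contains acc
  | acc, ch :: rest =>
    if ch = '/' ∧ norm.contains acc = true then true
    else bScan norm (acc ++ [ch]) rest

def is_path_excluded_alt (path : String) (exclude_paths : List String) : Bool :=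
  bScan (bSet exclude_paths) [] (bNormP path)

-- ===== PRECONDITION & SPEC =====
def Spec_is_path_excluded (path : String) (exclude_paths : List String) (out : Bool) : Prop := out = is_path_excluded_alt path exclude_paths
instance (path : String) (exclude_paths : List String) (out : Bool) : Decidable (Spec_is_path_excluded path exclude_paths out) := by unfold Spec_is_path_excluded; infer_instance

-- ===== CLAIM (what is proved, stated in full; the proofs are below) =====
def Claim_equal_is_path_excluded : Prop := ∀ (path : String) (exclude_paths : List String), Dom_is_path_excluded path exclude_paths → Spec_is_path_excluded path exclude_paths (is_path_excluded path exclude_paths)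

-- ===== LEMMAS AND PROOFS =====

-- the prefixes of acc ++ rest that B's scan still tests for membership
def bTests : List Char → List Char → List (List Char)
  | acc, [] => [acc]
  | acc, ch :: rest => (if ch = '/' then [acc] else []) ++ bTests (acc ++ [ch]) rest

lemma aLoop_iff (p : List Char) (l : List String) :
    aLoop p l = true ↔
      ∃ ex ∈ l, aNormEx ex ≠ [] ∧ (p = aNormEx ex ∨ PySem.Chars.startswith p (aNormEx ex ++ ['/']) = true) := by
  induction l with
  | nil => simp [aLoop]
  | cons ex rest ih =>
    simp only [aLoop]
    split_ifs with h h2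
    · rw [ih]
      simp only [List.mem_cons]
      constructor
      · rintro ⟨e, he, hne, hc⟩; exact ⟨e, Or.inr he, hne, hc⟩
      · rintro ⟨e, he | he, hne, hc⟩
        · subst he; exact absurd h hne
        · exact ⟨e, he, hne, hc⟩
    · simp only [List.mem_cons, true_iff]
      exact ⟨ex, Or.inl rfl, h, h2⟩
    · rw [ih]
      simp only [List.mem_cons]
      constructor
      · rintro ⟨e, he, hne, hc⟩; exact ⟨e, Or.inr he, hne, hc⟩
      · rintro ⟨e, he | he, hne, hc⟩
        · subst he; exact absurd hc h2
        · exact ⟨e, he, hne, hc⟩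

lemma bSet_fold_mem (q : List Char) (l : List String) (s : PySem.Set (List Char)) :
    q ∈ l.foldl (fun s ex => let exn := bNormEx ex; if exn = [] then s else s.add exn) s ↔
      q ∈ s ∨ (q ≠ [] ∧ ∃ ex ∈ l, bNormEx ex = q) := by
  induction l generalizing s with
  | nil => simp
  | cons ex rest ih =>
    rw [List.foldl_cons, ih]
    by_cases h : bNormEx ex = []
    · simp only [h, List.mem_cons]
      constructor
      · rintro (hs | ⟨hne, e, he, hq⟩)
        · exact Or.inl hs
        · exact Or.inr ⟨hne, e, Or.inr he, hq⟩
      · rintro (hs | ⟨hne, e, he | he, hq⟩)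
        · exact Or.inl hs
        · subst he; rw [h] at hq; exact absurd hq.symm hne
        · exact Or.inr ⟨hne, e, he, hq⟩
    · simp only [if_neg h, PySem.Set.mem_add, List.mem_cons]
      constructor
      · rintro ((hs | hq) | ⟨hne, e, he, hq⟩)
        · exact Or.inl hs
        · exact Or.inr ⟨hq ▸ h, ex, Or.inl rfl, hq.symm⟩
        · exact Or.inr ⟨hne, e, Or.inr he, hq⟩
      · rintro (hs | ⟨hne, e, he | he, hq⟩)
        · exact Or.inl (Or.inl hs)
        · subst he; exact Or.inl (Or.inr hq.symm)
        · exact Or.inr ⟨hne, e, he, hq⟩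

lemma mem_bSet (q : List Char) (l : List String) :
    q ∈ bSet l ↔ q ≠ [] ∧ ∃ ex ∈ l, bNormEx ex = q := by
  rw [bSet, bSet_fold_mem]; simp

lemma bScan_iff (norm : PySem.Set (List Char)) (rest acc : List Char) :
    bScan norm acc rest = true ↔ ∃ q ∈ bTests acc rest, norm.contains q = true := by
  induction rest generalizing acc with
  | nil => simp [bScan, bTests]
  | cons ch r ih =>
    simp only [bScan, bTests]
    split_ifs with h hch hch
    · simp only [true_iff]
      exact ⟨acc, by simp, h.2⟩
    · exact absurd h.1 hch
    · have hcon : norm.contains acc = false := by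
        cases hc : norm.contains acc
        · rfl
        · exact absurd ⟨hch, hc⟩ h
      have hna : acc ∉ norm := fun hm => by
        rw [(PySem.Set.contains_iff norm acc).mpr hm] at hcon; cases hcon
      rw [ih]
      simp [hna]
    · rw [ih]; simp

lemma mem_bTests (q rest acc : List Char) :
    q ∈ bTests acc rest ↔
      q = acc ++ rest ∨ ((∃ t, acc ++ rest = q ++ '/' :: t) ∧ ∃ u, q = acc ++ u) := by
  induction rest generalizing acc with
  | nil =>
    simp only [bTests, List.mem_singleton, List.append_nil]
    constructor
    · intro h; exact Or.inl h
    · rintro (h | ⟨⟨t, ht⟩, ⟨u, hu⟩⟩)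
      · exact h
      · exfalso; subst hu
        have := congrArg List.length ht
        simp at this
  | cons ch r ih =>
    simp only [bTests, List.mem_append, ih]
    constructor
    · rintro (hq | hq | ⟨⟨t, ht⟩, ⟨u, hu⟩⟩)
      · by_cases hch : ch = '/'
        · rw [if_pos hch, List.mem_singleton] at hq
          subst hq hch
          exact Or.inr ⟨⟨r, rfl⟩, [], by simp⟩
        · rw [if_neg hch] at hq; cases hq
      · subst hq; left; simp
      · right
        refine ⟨⟨t, by simpa using ht⟩, ch :: u, by simpa using hu⟩
    · rintro (hq | ⟨⟨t, ht⟩, ⟨u, hu⟩⟩)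
      · subst hq; right; left; simp
      · rcases u with _ | ⟨u0, u'⟩
        · simp only [List.append_nil] at hu
          subst hu
          have hch : ch = '/' := by
            have := List.append_cancel_left (ht.symm ▸ rfl : q ++ ch :: r = q ++ '/' :: t)
            exact (List.cons.injEq .. ▸ this).1
          left; simp [hch]
        · subst hu
          have ht' : acc ++ ch :: r = (acc ++ u0 :: u') ++ '/' :: t := ht
          rw [List.append_assoc] at ht'
          have := List.append_cancel_left ht'
          have hcu : ch = u0 ∧ r = u' ++ '/' :: t := by
            simpa using this
          right; right
          refine ⟨⟨t, ?_⟩, u', by simp [hcu.1]⟩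
          simp [hcu.1, hcu.2]

lemma bNormEx_eq_aNormEx : bNormEx = aNormEx := rfl
lemma bNormP_eq_aNormP : bNormP = aNormP := rfl

-- ===== VERDICT (by name: the statement is the Claim_ definition above) =====
theorem is_path_excluded_spec : Claim_equal_is_path_excluded := by
  intro path l _
  unfold Spec_is_path_excluded is_path_excluded is_path_excluded_alt
  rw [Bool.eq_iff_iff, aLoop_iff, bScan_iff, bNormP_eq_aNormP]
  constructor
  · rintro ⟨ex, he, hnz, hc⟩
    refine ⟨aNormEx ex, ?_, ?_⟩
    · rw [mem_bTests]
      rcases hc with hc | hc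
      · left; simpa using hc.symm
      · rw [PySem.Chars.startswith_iff] at hc
        obtain ⟨t, ht⟩ := hc
        exact Or.inr ⟨⟨t, by simp [← ht]⟩, aNormEx ex, by simp⟩
    · rw [PySem.Set.contains_iff, mem_bSet, bNormEx_eq_aNormEx]
      exact ⟨hnz, ex, he, rfl⟩
  · rintro ⟨q, hq, hcon⟩
    rw [PySem.Set.contains_iff, mem_bSet, bNormEx_eq_aNormEx] at hcon
    obtain ⟨hnz, ex, he, hq'⟩ := hcon
    rw [mem_bTests] at hq
    refine ⟨ex, he, hq'.symm ▸ hnz, ?_⟩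
    rcases hq with h | ⟨⟨t, ht⟩, -⟩
    · left; rw [hq']; simpa using h.symm
    · right
      rw [PySem.Chars.startswith_iff]
      exact ⟨t, by simp [hq', ← ht]⟩
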